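-- pv_equiv track=rewrite | github.com/brb45/Desk_2 | proc_lt_std.py | sortA
-- ===== SOURCE A (Python) =====
-- def sortA( A):
--     arr_len = len(A)
--     rst = list(range(arr_len))
--     i, j = 0, arr_len - 1
--     for item in A:
--         if item % 2 == 0:
--             rst[i] = item
--             i += 1
--         else:
--             rst[j] = item
--             j -= 1
--     return rst
-- ===== SOURCE B (Python) =====
-- def sortA(A):
--     evens = [x for x in A if x % 2 == 0]
--     odds = [x for x in A if x % 2 != 0]
--     return evens + odds[::-1]
-- ===== Notes on version B (the rewrite author's own statement) =====
-- stated objective: simpler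
-- what changed: Replaces the preallocated range-buffer with two-pointer in-place writes by building the even and odd sublists directly and returning evens + reversed(odds).
import Mathlib
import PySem

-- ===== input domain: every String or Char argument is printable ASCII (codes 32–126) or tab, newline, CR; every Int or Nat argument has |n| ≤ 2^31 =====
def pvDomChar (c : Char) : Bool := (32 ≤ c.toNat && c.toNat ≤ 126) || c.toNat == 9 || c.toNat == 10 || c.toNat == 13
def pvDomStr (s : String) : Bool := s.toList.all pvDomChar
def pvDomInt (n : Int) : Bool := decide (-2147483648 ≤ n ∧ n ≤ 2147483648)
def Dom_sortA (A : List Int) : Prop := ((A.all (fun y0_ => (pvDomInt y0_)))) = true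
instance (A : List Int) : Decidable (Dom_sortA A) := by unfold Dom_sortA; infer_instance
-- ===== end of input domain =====

-- B builds the even and odd sublists directly and returns evens ++ reverse odds,
-- instead of A's preallocated range buffer written through two index pointers.

-- ===== PORT A =====
-- one loop step: write item at i (even) or at j (odd); the indices stay in range
-- on every input, so the total pySetD is exact here.
def sortAStep (s : List Int × Int × Int) (item : Int) : List Int × Int × Int :=
  if PySem.Int.mod item 2 = 0 then
    (PySem.List.pySetD s.1 s.2.1 item, s.2.1 + 1, s.2.2)
  else
    (PySem.List.pySetD s.1 s.2.2 item, s.2.1, s.2.2 - 1)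

def sortA (A : List Int) : List Int :=
  (A.foldl sortAStep
    (PySem.List.pyRange 0 (A.length : Int) 1, 0, (A.length : Int) - 1)).1

-- ===== PORT B =====
def sortA_alt (A : List Int) : List Int :=
  (A.filter (fun x => PySem.Int.mod x 2 = 0)) ++
  (A.filter (fun x => ¬ PySem.Int.mod x 2 = 0)).reverse

-- ===== PRECONDITION & SPEC =====
def Spec_sortA (A : List Int) (out : List Int) : Prop := out = sortA_alt A
instance (A : List Int) (out : List Int) : Decidable (Spec_sortA A out) := by unfold Spec_sortA; infer_instance

-- ===== CLAIM (what is proved, stated in full; the proofs are below) =====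
def Claim_equal_sortA : Prop := ∀ (A : List Int), Dom_sortA A → Spec_sortA A (sortA A)

-- ===== LEMMAS AND PROOFS =====

theorem set_append_add (E xs : List Int) (k : Nat) (v : Int) :
    (E ++ xs).set (E.length + k) v = E ++ xs.set k v := by
  induction E with
  | nil => simp
  | cons a E ih => simp [Nat.succ_add, ih]

theorem set_mid_head (E ms R : List Int) (m x : Int) :
    (E ++ (m :: ms) ++ R).set E.length x = (E ++ [x]) ++ ms ++ R := by
  have h := set_append_add E (m :: ms ++ R) 0 x
  simp only [Nat.add_zero, List.set_cons_zero] at h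
  simp only [List.append_assoc] at h ⊢
  simpa using h

theorem set_mid_last (E ms R : List Int) (m x : Int) :
    (E ++ (ms ++ [m]) ++ R).set (E.length + ms.length) x = E ++ ms ++ x :: R := by
  have h3 : ((ms ++ [m]) ++ R).set ms.length x = ms ++ x :: R := by
    have h := set_append_add ms ([m] ++ R) 0 x
    simpa using h
  rw [List.append_assoc, set_append_add, h3]
  simp

theorem sortA_loop (rest : List Int) : ∀ (E mid O : List Int),
    mid.length = rest.length →
    (rest.foldl sortAStep
        (E ++ mid ++ O.reverse, (E.length : Int),
          (E.length : Int) + (mid.length : Int) - 1)).1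
      = E ++ rest.filter (fun x => decide (PySem.Int.mod x 2 = 0))
          ++ (rest.filter (fun x => decide (¬ PySem.Int.mod x 2 = 0))).reverse
          ++ O.reverse := by
  induction rest with
  | nil =>
    intro E mid O h
    have : mid = [] := List.eq_nil_of_length_eq_zero h
    simp [this]
  | cons x rest ih =>
    intro E mid O h
    by_cases hx : PySem.Int.mod x 2 = 0
    · -- even: write at i, mid loses its head
      obtain ⟨m, ms, rfl⟩ : ∃ m ms, mid = m :: ms := by
        cases mid with
        | nil => simp at h
        | cons m ms => exact ⟨m, ms, rfl⟩
      have hstep : sortAStep (E ++ m :: ms ++ O.reverse, (E.length : Int),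
            (E.length : Int) + ((m :: ms).length : Int) - 1) x
          = ((E ++ [x]) ++ ms ++ O.reverse, ((E ++ [x]).length : Int),
              ((E ++ [x]).length : Int) + (ms.length : Int) - 1) := by
        simp only [sortAStep, if_pos hx]
        refine Prod.ext ?_ (Prod.ext ?_ ?_)
        · show PySem.List.pySetD (E ++ m :: ms ++ O.reverse) (E.length : Int) x
              = (E ++ [x]) ++ ms ++ O.reverse
          rw [PySem.List.pySetD_natCast]
          exact set_mid_head E ms O.reverse m x
        · simp
        · simp only [List.length_cons, List.length_append, List.length_nil]
          push_cast; ring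
      simp only [List.foldl_cons, hstep]
      rw [ih (E ++ [x]) ms O (by simpa using h)]
      rw [List.filter_cons_of_pos (by simpa using hx), List.filter_cons_of_neg (by simpa using hx)]
      simp
    · -- odd: write at j = the last slot of mid, mid loses its last element
      have hne : mid ≠ [] := by intro hn; simp [hn] at h
      obtain ⟨ms, m, rfl⟩ : ∃ ms m, mid = ms ++ [m] := by
        refine ⟨mid.dropLast, mid.getLast hne, ?_⟩
        exact (List.dropLast_append_getLast hne).symm
      have hj : (E.length : Int) + (((ms ++ [m]).length : Int)) - 1
          = ((E.length + ms.length : Nat) : Int) := by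
        simp only [List.length_append, List.length_cons, List.length_nil]
        push_cast; ring
      have hstep : sortAStep (E ++ (ms ++ [m]) ++ O.reverse, (E.length : Int),
            (E.length : Int) + (((ms ++ [m]).length) : Int) - 1) x
          = (E ++ ms ++ (O ++ [x]).reverse, (E.length : Int),
              (E.length : Int) + (ms.length : Int) - 1) := by
        simp only [sortAStep, if_neg hx]
        refine Prod.ext ?_ (Prod.ext rfl ?_)
        · show PySem.List.pySetD (E ++ (ms ++ [m]) ++ O.reverse)
              ((E.length : Int) + (((ms ++ [m]).length) : Int) - 1) x
              = E ++ ms ++ (O ++ [x]).reverse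
          rw [hj, PySem.List.pySetD_natCast, set_mid_last E ms O.reverse m x]
          simp
        · show (E.length : Int) + (((ms ++ [m]).length) : Int) - 1 - 1
              = (E.length : Int) + (ms.length : Int) - 1
          simp only [List.length_append, List.length_cons, List.length_nil]
          push_cast; ring
      simp only [List.foldl_cons, hstep]
      rw [ih E ms (O ++ [x]) (by simp at h ⊢; omega)]
      rw [List.filter_cons_of_neg (by simpa using hx), List.filter_cons_of_pos (by simpa using hx)]
      simp

-- ===== VERDICT (by name: the statement is the Claim_ definition above) =====
theorem sortA_spec : Claim_equal_sortA := by
  intro A _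
  show sortA A = sortA_alt A
  unfold sortA sortA_alt
  have hlen : (PySem.List.pyRange 0 (A.length : Int) 1).length = A.length := by
    simp [PySem.List.length_pyRange_one]
  have h := sortA_loop A [] (PySem.List.pyRange 0 (A.length : Int) 1) [] hlen
  simpa [hlen] using h
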